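-- pv_equiv track=rewrite | github.com/Krouli-TUDUDU/Alg_4343_Gerashchenkova | Gerashchenkova_Mariya_4343_lb1/with_log.py | first_info
-- ===== SOURCE A (Python) =====
-- def first_info(h, n):
--     min_h = h[0]
--     pos = 0
--     for i in range(1, n):
--         if h[i] < min_h:
--             min_h = h[i]
--             pos = i
--
--     run = 1
--     i = pos + 1
--     while i < n and h[i] == min_h:
--         run += 1
--         i += 1
--
--     max_size = run
--     down = n - min_h
--     if max_size > down:
--         max_size = down
--
--     return pos, min_h, max_size
-- ===== SOURCE B (Python) =====
-- def first_info(h, n):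
--     min_h, pos, run = h[0], 0, 1
--     for i in range(1, n):
--         v = h[i]
--         if v < min_h:
--             min_h, pos, run = v, i, 1
--         elif v == min_h and i == pos + run:
--             run += 1
--     down = n - min_h
--     return pos, min_h, min(run, down)
-- ===== Notes on version B (the rewrite author's own statement) =====
-- stated objective: simpler
-- what changed: Fuses A's two sequential passes (argmin loop, then a separate while-loop counting the run of the minimum) into a single forward pass that maintains min, position and run length together, resetting the run on a new minimum and extending it only contiguously.
import Mathlib
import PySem

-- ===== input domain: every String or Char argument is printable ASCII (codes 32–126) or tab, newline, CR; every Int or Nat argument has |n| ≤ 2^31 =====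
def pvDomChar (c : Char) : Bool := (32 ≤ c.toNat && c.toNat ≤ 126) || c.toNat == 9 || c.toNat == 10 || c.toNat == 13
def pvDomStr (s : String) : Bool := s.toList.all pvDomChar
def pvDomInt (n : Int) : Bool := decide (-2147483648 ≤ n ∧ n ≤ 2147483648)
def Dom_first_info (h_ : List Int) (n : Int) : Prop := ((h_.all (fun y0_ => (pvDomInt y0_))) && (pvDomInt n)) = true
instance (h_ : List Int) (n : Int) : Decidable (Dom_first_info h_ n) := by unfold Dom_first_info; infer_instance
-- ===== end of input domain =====

-- B fuses A's two passes (argmin, then a while-loop counting the run of the minimum)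
-- into one forward pass maintaining (min, pos, run) together; objective: simpler.

-- ===== PORT A =====
-- the while-loop 'while i < n and h[i] == min_h: run += 1; i += 1', returning run
def fiWhile (h_ : List Int) (n min_h i run : Int) : Int :=
  if h : i < n ∧ PySem.List.pyGetD h_ i 0 = min_h then
    fiWhile h_ n min_h (i + 1) (run + 1)
  else run
termination_by (n - i).toNat
decreasing_by omega

def first_info (h_ : List Int) (n : Int) : Int × Int × Int :=
  let s := (PySem.List.pyRange 1 n 1).foldl
    (fun (st : Int × Int) i =>
      if PySem.List.pyGetD h_ i 0 < st.1 then (PySem.List.pyGetD h_ i 0, i) else st)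
    (PySem.List.pyGetD h_ 0 0, 0)
  let run := fiWhile h_ n s.1 (s.2 + 1) 1
  let max_size := run
  let down := n - s.1
  let max_size := if max_size > down then down else max_size
  (s.2, s.1, max_size)

-- ===== PORT B =====
def first_info_alt (h_ : List Int) (n : Int) : Int × Int × Int :=
  let s := (PySem.List.pyRange 1 n 1).foldl
    (fun (st : Int × Int × Int) i =>
      if PySem.List.pyGetD h_ i 0 < st.1 then (PySem.List.pyGetD h_ i 0, i, 1)
      else if PySem.List.pyGetD h_ i 0 = st.1 ∧ i = st.2.1 + st.2.2 then (st.1, st.2.1, st.2.2 + 1)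
      else st)
    (PySem.List.pyGetD h_ 0 0, 0, 1)
  let down := n - s.1
  (s.2.1, s.1, min s.2.2 down)

-- ===== PRECONDITION & SPEC =====
-- A raises IndexError when h is empty (h[0]) or when n exceeds len(h); exactly those inputs are excluded.
def Pre_first_info (h_ : List Int) (n : Int) : Prop := h_ ≠ [] ∧ n ≤ h_.length

instance (h_ : List Int) (n : Int) : Decidable (Pre_first_info h_ n) := by
  unfold Pre_first_info; infer_instance

def pvWitness_first_info : List Int × Int := ([3, 1, 1, 2], 4)

def Spec_first_info (h_ : List Int) (n : Int) (out : Int × Int × Int) : Prop := out = first_info_alt h_ n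
instance (h_ : List Int) (n : Int) (out : Int × Int × Int) : Decidable (Spec_first_info h_ n out) := by unfold Spec_first_info; infer_instance

-- ===== CLAIM (what is proved, stated in full; the proofs are below) =====
def Claim_equal_first_info : Prop := ∀ (h_ : List Int) (n : Int), Dom_first_info h_ n → Pre_first_info h_ n → Spec_first_info h_ n (first_info h_ n)

-- ===== LEMMAS AND PROOFS =====

-- abbreviations used only in proofs
def gA (h_ : List Int) (i : Int) : Int := PySem.List.pyGetD h_ i 0

def stepA (h_ : List Int) (st : Int × Int) (i : Int) : Int × Int :=
  if PySem.List.pyGetD h_ i 0 < st.1 then (PySem.List.pyGetD h_ i 0, i) else st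

def stepB (h_ : List Int) (st : Int × Int × Int) (i : Int) : Int × Int × Int :=
  if PySem.List.pyGetD h_ i 0 < st.1 then (PySem.List.pyGetD h_ i 0, i, 1)
  else if PySem.List.pyGetD h_ i 0 = st.1 ∧ i = st.2.1 + st.2.2 then (st.1, st.2.1, st.2.2 + 1)
  else st

def idxs (m : Nat) : List Int := (List.range m).map (fun k : Nat => (1 : Int) + (k : Int))

theorem idxs_succ (m : Nat) : idxs (m + 1) = idxs m ++ [(1 : Int) + (m : Int)] := by
  simp [idxs, List.range_succ]

theorem fiWhile_stop (h_ : List Int) (n m i run : Int)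
    (h : ¬ (i < n ∧ PySem.List.pyGetD h_ i 0 = m)) :
    fiWhile h_ n m i run = run := by
  rw [fiWhile]; simp [h]

theorem fiWhile_step (h_ : List Int) (n m i run : Int)
    (h : i < n ∧ PySem.List.pyGetD h_ i 0 = m) :
    fiWhile h_ n m i run = fiWhile h_ n m (i + 1) (run + 1) := by
  rw [fiWhile]; simp [h]

-- bumping the bound of the while-loop by one: the new index b is counted only
-- if the loop reached it, i.e. made exactly b - i steps
theorem fiWhile_bump (h_ : List Int) (m b : Int) :
    ∀ (i run : Int), i ≤ b →
    fiWhile h_ (b + 1) m i run =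
      (if PySem.List.pyGetD h_ b 0 = m ∧ b = i + (fiWhile h_ b m i run - run)
       then fiWhile h_ b m i run + 1 else fiWhile h_ b m i run) := by
  intro i
  induction hk : (b - i).toNat generalizing i with
  | zero =>
    intro run hib
    have hbi : i = b := by omega
    subst hbi
    have hstop : ¬ (i < i ∧ PySem.List.pyGetD h_ i 0 = m) := by omega
    rw [fiWhile_stop h_ i m i run hstop]
    by_cases hg : PySem.List.pyGetD h_ i 0 = m
    · rw [fiWhile_step h_ (i+1) m i run ⟨by omega, hg⟩,
          fiWhile_stop h_ (i+1) m (i+1) (run+1) (by omega)]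
      rw [if_pos ⟨hg, by omega⟩]
    · rw [fiWhile_stop h_ (i+1) m i run (fun hc => hg hc.2)]
      rw [if_neg (fun hc => hg hc.1)]
  | succ k ih =>
    intro run hib
    have hlt : i < b := by omega
    by_cases hg : PySem.List.pyGetD h_ i 0 = m
    · rw [fiWhile_step h_ (b+1) m i run ⟨by omega, hg⟩,
          fiWhile_step h_ b m i run ⟨hlt, hg⟩]
      rw [ih (i + 1) (by omega) (run + 1) (by omega)]
      by_cases hc : PySem.List.pyGetD h_ b 0 = m ∧ b = (i+1) + (fiWhile h_ b m (i+1) (run+1) - (run+1))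
      · rw [if_pos hc, if_pos (⟨hc.1, by omega⟩ :
          PySem.List.pyGetD h_ b 0 = m ∧ b = i + (fiWhile h_ b m (i+1) (run+1) - run))]
      · rw [if_neg hc, if_neg (fun h2 => hc ⟨h2.1, by omega⟩)]
    · rw [fiWhile_stop h_ (b+1) m i run (fun hc => hg hc.2),
          fiWhile_stop h_ b m i run (fun hc => hg hc.2)]
      rw [if_neg (fun hc => by omega)]

-- the A-fold's position stays within [0, m]
theorem stepA_pos_bound (h_ : List Int) (m : Nat) :
    0 ≤ ((idxs m).foldl (stepA h_) (gA h_ 0, 0)).2 ∧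
    ((idxs m).foldl (stepA h_) (gA h_ 0, 0)).2 ≤ m := by
  induction m with
  | zero => simp [idxs]
  | succ k ih =>
    rw [idxs_succ, List.foldl_append]
    simp only [List.foldl_cons, List.foldl_nil]
    set s := (idxs k).foldl (stepA h_) (gA h_ 0, 0) with hs
    obtain ⟨h1, h2⟩ := ih
    unfold stepA
    split <;> constructor <;> push_cast <;> omega

-- main invariant: the fused fold over indices 1..m computes A's fold state
-- together with the run length A's while-loop would report with bound 1+m
theorem fused_inv (h_ : List Int) (m : Nat) :
    (idxs m).foldl (stepB h_) (gA h_ 0, 0, 1) =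
      (((idxs m).foldl (stepA h_) (gA h_ 0, 0)).1,
       ((idxs m).foldl (stepA h_) (gA h_ 0, 0)).2,
       fiWhile h_ (1 + (m : Int)) (((idxs m).foldl (stepA h_) (gA h_ 0, 0)).1)
         (((idxs m).foldl (stepA h_) (gA h_ 0, 0)).2 + 1) 1) := by
  induction m with
  | zero =>
    simp only [idxs, List.range_zero, List.map_nil, List.foldl_nil, Nat.cast_zero]
    rw [fiWhile_stop h_ (1 + 0) (gA h_ 0) (0 + 1) 1 (by omega)]
  | succ k ih =>
    rw [idxs_succ, List.foldl_append, List.foldl_append]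
    simp only [List.foldl_cons, List.foldl_nil]
    rw [ih]
    set s := (idxs k).foldl (stepA h_) (gA h_ 0, 0) with hs
    have hposb := stepA_pos_bound h_ k
    rw [← hs] at hposb
    have hb : (1 : Int) + ((k + 1 : Nat) : Int) = (1 + (k : Int)) + 1 := by push_cast; ring
    unfold stepA stepB
    by_cases hlt : PySem.List.pyGetD h_ (1 + (k : Int)) 0 < s.1
    · rw [if_pos hlt, if_pos hlt]
      rw [hb, fiWhile_stop h_ ((1 + (k:Int)) + 1) (PySem.List.pyGetD h_ (1 + (k:Int)) 0)
            ((1 + (k:Int)) + 1) 1 (by omega)]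
    · rw [if_neg hlt, if_neg hlt]
      have hbump := fiWhile_bump h_ s.1 (1 + (k : Int)) (s.2 + 1) 1 (by omega)
      rw [hb, hbump]
      by_cases hc : PySem.List.pyGetD h_ (1 + (k:Int)) 0 = s.1 ∧
          (1 : Int) + (k : Int) = s.2 + fiWhile h_ (1 + (k:Int)) s.1 (s.2 + 1) 1
      · rw [if_pos hc, if_pos (⟨hc.1, by omega⟩ :
          PySem.List.pyGetD h_ (1 + (k:Int)) 0 = s.1 ∧
          (1 : Int) + (k : Int) = (s.2 + 1) + (fiWhile h_ (1 + (k:Int)) s.1 (s.2 + 1) 1 - 1))]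
      · rw [if_neg hc, if_neg (fun h2 => hc ⟨h2.1, by omega⟩)]

theorem min_eq_ite (a b : Int) : min a b = if a > b then b else a := by
  split <;> omega

-- ===== VERDICT (by name: the statement is the Claim_ definition above) =====
theorem first_info_spec : Claim_equal_first_info := by
  intro h_ n _ _
  unfold Spec_first_info first_info first_info_alt
  by_cases hn : n ≤ 1
  · rw [PySem.List.pyRange_one_eq_nil (show n ≤ 1 from hn)]
    simp only [List.foldl_nil]
    rw [fiWhile_stop h_ n (PySem.List.pyGetD h_ 0 0) (0 + 1) 1 (by omega)]
    rw [min_eq_ite]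
  · have hm : n = 1 + (((n - 1).toNat : Nat) : Int) := by omega
    have hrange : PySem.List.pyRange 1 n 1 = idxs (n - 1).toNat := by
      rw [PySem.List.pyRange_one]; rfl
    have hA : (fun (st : Int × Int) i =>
        if PySem.List.pyGetD h_ i 0 < st.1 then (PySem.List.pyGetD h_ i 0, i) else st)
        = stepA h_ := rfl
    have hB : (fun (st : Int × Int × Int) i =>
        if PySem.List.pyGetD h_ i 0 < st.1 then (PySem.List.pyGetD h_ i 0, i, 1)
        else if PySem.List.pyGetD h_ i 0 = st.1 ∧ i = st.2.1 + st.2.2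
          then (st.1, st.2.1, st.2.2 + 1) else st)
        = stepB h_ := rfl
    simp only [hrange]
    rw [show (PySem.List.pyGetD h_ 0 0) = gA h_ 0 from rfl]
    rw [hA, hB, fused_inv h_ (n - 1).toNat]
    rw [← hm, min_eq_ite]
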